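-- pv_equiv track=rewrite | github.com/Tsalyk/HW | HW9/skates.py | check_skates
-- ===== SOURCE A (Python) =====
-- def check_skates(available_skates: list, sizes: list) -> list:
--     available_skates.sort()
--     sizes.sort()
--     deleted_items = []
--
--     for i in available_skates:
--         for j in sizes:
--             if i >= j:
--                 deleted_items.append(j)
--                 sizes.remove(j)
--                 available_skates.remove(i)
--                 available_skates.insert(0, 0)
--                 break
--     return len(deleted_items)
-- ===== SOURCE B (Python) =====
-- def check_skates(available_skates: list, sizes: list) -> list:
--     # Two-pointer greedy: sort copies of both lists; walk skates in ascending
--     # order, advancing a single index into the sorted sizes on each match.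
--     # (Return value only: unlike A, B does not mutate its arguments.)
--     a = sorted(available_skates)
--     s = sorted(sizes)
--     j = 0
--     for x in a:
--         if j < len(s) and x >= s[j]:
--             j += 1
--     return j
-- ===== Notes on version B (the rewrite author's own statement) =====
-- stated objective: faster
-- what changed: Replaced A's nested scan over the mutated sizes list with repeated list.remove/insert (O(n*m) with O(n) removals) by a sort-then-two-pointer greedy that keeps a single index into the sorted sizes; B mutates neither argument.
import Mathlib
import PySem

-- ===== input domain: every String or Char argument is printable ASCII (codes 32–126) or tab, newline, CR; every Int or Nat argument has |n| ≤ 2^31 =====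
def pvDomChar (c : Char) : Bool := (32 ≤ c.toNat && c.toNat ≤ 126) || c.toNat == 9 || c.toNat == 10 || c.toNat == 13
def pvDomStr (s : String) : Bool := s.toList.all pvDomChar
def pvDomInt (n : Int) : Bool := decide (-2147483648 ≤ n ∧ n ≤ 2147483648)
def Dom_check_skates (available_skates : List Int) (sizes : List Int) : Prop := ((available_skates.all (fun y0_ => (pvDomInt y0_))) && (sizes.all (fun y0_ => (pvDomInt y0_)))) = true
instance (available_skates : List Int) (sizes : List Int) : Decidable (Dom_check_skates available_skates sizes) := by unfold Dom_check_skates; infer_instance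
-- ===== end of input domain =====

-- B replaces A's nested scans with list mutation by a sort-then-two-pointer greedy (faster,
-- asymptotic). Equivalence is about the RETURN value only: Python A sorts/mutates its
-- arguments in place, B does not.

-- ===== PORT A =====
-- for i in available_skates (the list is mutated but keeps its length; the loop's hidden
-- cursor is `idx`, the iteration count is bounded by the constant length = fuel):
def pvLoopA (fuel : Nat) (skates sizes deleted : List Int) (idx : Nat) : List Int :=
  match fuel with
  | 0 => deleted
  | fuel + 1 =>
    match PySem.List.pyGet? skates (idx : Int) with
    | none => deleted
    | some i =>
      -- for j in sizes: if i >= j: … break  → first j with i ≥ j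
      match sizes.find? (fun j => decide (i ≥ j)) with
      | none => pvLoopA fuel skates sizes deleted (idx + 1)
      | some j =>
        -- sizes.remove(j); available_skates.remove(i); available_skates.insert(0, 0)
        -- (j and i are present, so remove? is never none; getD's default is unreachable)
        pvLoopA fuel
          (0 :: (PySem.List.remove? skates i).getD skates)
          ((PySem.List.remove? sizes j).getD sizes)
          (deleted ++ [j]) (idx + 1)

def check_skates (available_skates : List Int) (sizes : List Int) : Int :=
  let a := PySem.List.sorted available_skates (fun x => x) false
  let s := PySem.List.sorted sizes (fun x => x) false
  ((pvLoopA a.length a s [] 0).length : Int)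

-- ===== PORT B =====
def pvLoopB (s : List Int) (a : List Int) (j : Nat) : Nat :=
  match a with
  | [] => j
  | x :: rest =>
    match s[j]? with
    | some v => if x ≥ v then pvLoopB s rest (j + 1) else pvLoopB s rest j
    | none => pvLoopB s rest j

def check_skates_alt (available_skates : List Int) (sizes : List Int) : Int :=
  let a := PySem.List.sorted available_skates (fun x => x) false
  let s := PySem.List.sorted sizes (fun x => x) false
  ((pvLoopB s a 0 : Nat) : Int)

-- ===== PRECONDITION & SPEC =====
def Spec_check_skates (available_skates : List Int) (sizes : List Int) (out : Int) : Prop := out = check_skates_alt available_skates sizes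
instance (available_skates : List Int) (sizes : List Int) (out : Int) : Decidable (Spec_check_skates available_skates sizes out) := by unfold Spec_check_skates; infer_instance

-- ===== CLAIM (what is proved, stated in full; the proofs are below) =====
def Claim_equal_check_skates : Prop := ∀ (available_skates : List Int) (sizes : List Int), Dom_check_skates available_skates sizes → Spec_check_skates available_skates sizes (check_skates available_skates sizes)

-- ===== LEMMAS AND PROOFS =====

/-- Common greedy count: match each skate (ascending) against the head of the
    remaining sorted sizes. -/
def pvG (s a : List Int) : Nat :=
  match a, s with
  | [], _ => 0
  | _ :: rest, [] => pvG [] rest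
  | x :: rest, v :: s' => if x ≥ v then 1 + pvG s' rest else pvG (v :: s') rest

theorem pvG_nil (a : List Int) : pvG [] a = 0 := by
  induction a with
  | nil => rfl
  | cons x rest ih => simpa [pvG] using ih

theorem pvLoopB_eq (s : List Int) (a : List Int) (j : Nat) :
    pvLoopB s a j = j + pvG (s.drop j) a := by
  induction a generalizing j with
  | nil => simp [pvLoopB, pvG]
  | cons x rest ih =>
    cases hsj : s[j]? with
    | none =>
      have hnil : s.drop j = [] := by
        rw [List.getElem?_eq_none_iff] at hsj
        exact List.drop_eq_nil_of_le hsj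
      simp [pvLoopB, hsj, ih, hnil, pvG_nil]
    | some v =>
      obtain ⟨hj, hv⟩ := List.getElem?_eq_some_iff.mp hsj
      have hd : s.drop j = v :: s.drop (j + 1) := by
        rw [List.drop_eq_getElem_cons hj, hv]
      by_cases hx : x ≥ v
      · simp [pvLoopB, hsj, hx, ih, hd, pvG]; omega
      · simp [pvLoopB, hsj, hx, ih, hd, pvG]

/-- Erasing the first occurrence of the element found at index `idx` leaves the
    suffix beyond `idx` unchanged. -/
theorem pvErase_drop (l : List Int) (idx : Nat) (x : Int) (h : l[idx]? = some x) :
    (l.erase x).drop idx = l.drop (idx + 1) := by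
  induction l generalizing idx with
  | nil => simp at h
  | cons y t ih =>
    cases idx with
    | zero =>
      simp at h
      subst h
      simp
    | succ n =>
      simp at h
      by_cases hy : y = x
      · subst hy
        rw [List.erase_cons_head]
        simp
      · rw [List.erase_cons_tail (by simp [hy])]
        simp only [List.drop_succ_cons]
        exact ih n h

/-- Invariant for A's loop: the suffix of `skates` beyond the cursor is the untouched
    tail `rest`, the length is constant, and `sizes` stays sorted; the number of
    items appended to `deleted` is the greedy count `pvG sizes rest`. -/
theorem pvLoopA_eq (rest : List Int) :
    ∀ (fuel : Nat) (skates sizes deleted : List Int) (idx : Nat),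
    skates.drop idx = rest →
    skates.length = idx + rest.length →
    rest.length ≤ fuel →
    sizes.Pairwise (· ≤ ·) →
    (pvLoopA fuel skates sizes deleted idx).length = deleted.length + pvG sizes rest := by
  induction rest with
  | nil =>
    intro fuel skates sizes deleted idx hdrop hlen hfuel hsort
    have hget : skates[idx]? = none := by
      apply List.getElem?_eq_none
      simp at hlen
      omega
    cases fuel with
    | zero => simp [pvLoopA, pvG]
    | succ f => simp [pvLoopA, PySem.List.pyGet?_natCast, hget, pvG]
  | cons x rest' ih =>
    intro fuel skates sizes deleted idx hdrop hlen hfuel hsort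
    cases fuel with
    | zero => simp at hfuel
    | succ f =>
      have hget : skates[idx]? = some x := by
        have h0 : (skates.drop idx)[0]? = skates[idx + 0]? := List.getElem?_drop
        rw [hdrop] at h0
        simpa using h0.symm
      have hrest' : skates.drop (idx + 1) = rest' := by
        have := congrArg List.tail hdrop
        simpa [List.tail_drop] using this
      have hlen' : skates.length = (idx + 1) + rest'.length := by
        simp at hlen; omega
      have hfuel' : rest'.length ≤ f := by
        simp at hfuel; omega
      cases sizes with
      | nil =>
        rw [pvLoopA]
        simp only [PySem.List.pyGet?_natCast, hget, List.find?_nil]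
        rw [ih f skates [] deleted (idx + 1) hrest' hlen' hfuel' (by simp)]
        simp [pvG, pvG_nil]
      | cons v s' =>
        have hsort' : s'.Pairwise (· ≤ ·) := hsort.tail
        by_cases hx : x ≥ v
        · -- match: remove head v from sizes, erase x from skates, prepend 0
          have hfind : (v :: s').find? (fun j => decide (x ≥ j)) = some v := by
            simp [hx]
          have hremS : PySem.List.remove? (v :: s') v = some s' :=
            PySem.List.remove?_cons_self v s'
          have hmem : x ∈ skates := List.mem_of_getElem? hget
          have hremA : PySem.List.remove? skates x = some (skates.erase x) :=
            PySem.List.remove?_eq_some_erase skates x hmem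
          rw [pvLoopA]
          simp only [PySem.List.pyGet?_natCast, hget, hfind, hremS, hremA, Option.getD_some]
          have hlenA : (0 :: skates.erase x).length = (idx + 1) + rest'.length := by
            have := List.length_erase_of_mem hmem
            simp at hlen ⊢
            omega
          have hdropA : (0 :: skates.erase x).drop (idx + 1) = rest' := by
            simp only [List.drop_succ_cons]
            rw [pvErase_drop skates idx x hget]
            exact hrest'
          rw [ih f _ s' (deleted ++ [v]) (idx + 1) hdropA hlenA hfuel' hsort']
          simp [pvG, hx]
          omega
        · -- no match: v > x and sizes sorted, so no element of sizes is ≤ x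
          have hfind : (v :: s').find? (fun j => decide (x ≥ j)) = none := by
            rw [List.find?_eq_none]
            intro j hj
            simp only [decide_eq_true_eq]
            rcases List.mem_cons.mp hj with h | h
            · omega
            · have hvj : v ≤ j := (List.pairwise_cons.mp hsort).1 j h
              omega
          rw [pvLoopA]
          simp only [PySem.List.pyGet?_natCast, hget, hfind]
          rw [ih f skates (v :: s') deleted (idx + 1) hrest' hlen' hfuel' hsort]
          simp [pvG, hx]

-- ===== VERDICT (by name: the statement is the Claim_ definition above) =====
theorem check_skates_spec : Claim_equal_check_skates := by
  intro available_skates sizes _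
  unfold Spec_check_skates check_skates check_skates_alt
  show ((pvLoopA (PySem.List.sorted available_skates (fun x => x) false).length
      (PySem.List.sorted available_skates (fun x => x) false)
      (PySem.List.sorted sizes (fun x => x) false) [] 0).length : Int)
    = ((pvLoopB (PySem.List.sorted sizes (fun x => x) false)
      (PySem.List.sorted available_skates (fun x => x) false) 0 : Nat) : Int)
  rw [pvLoopA_eq (PySem.List.sorted available_skates (fun x => x) false)
    _ _ _ [] 0 (by simp) (by simp) (le_refl _)
    (PySem.List.sorted_pairwise sizes (fun x => x))]
  rw [pvLoopB_eq]
  simp
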